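-- pv_equiv track=rewrite | github.com/Liordea/3d-printable-flute | whistle_flute.py | make_path_work
-- ===== SOURCE A (Python) =====
-- def make_path_work(pathstr):
-- 	new_path = ""
-- 	for char in pathstr:
-- 		if (char == '\\'):
-- 			new_path += r"\\"
-- 		else:
-- 			new_path += char
-- 	return new_path
-- ===== SOURCE B (Python) =====
-- def make_path_work(pathstr):
--     return "\\\\".join(pathstr.split("\\"))
-- ===== Notes on version B (the rewrite author's own statement) =====
-- stated objective: faster
-- what changed: Replaces the per-character accumulation loop (repeated string concatenation) with the split/join idiom: split on single backslashes, rejoin with doubled backslashes in one pass.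
import Mathlib
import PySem

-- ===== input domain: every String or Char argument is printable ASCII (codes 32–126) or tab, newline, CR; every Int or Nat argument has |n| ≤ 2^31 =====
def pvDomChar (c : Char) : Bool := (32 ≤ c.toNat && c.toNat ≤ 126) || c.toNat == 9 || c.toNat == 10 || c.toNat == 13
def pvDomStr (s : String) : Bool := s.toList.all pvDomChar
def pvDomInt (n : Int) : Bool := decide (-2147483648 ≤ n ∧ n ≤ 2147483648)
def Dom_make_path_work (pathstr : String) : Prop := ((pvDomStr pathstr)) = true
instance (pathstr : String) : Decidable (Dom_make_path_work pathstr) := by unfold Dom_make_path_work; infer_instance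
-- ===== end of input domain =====

-- B escapes backslashes via the split/join idiom instead of A's per-character accumulation loop.


-- ===== PORT A =====
-- A: accumulator loop over the characters, appending "\\" for each '\' and the char otherwise.
def make_path_work (pathstr : String) : String :=
  String.ofList (pathstr.toList.foldl
    (fun new_path char => new_path ++ (if char == '\\' then ['\\', '\\'] else [char])) [])

-- ===== PORT B =====
-- B: pathstr.split("\\") then "\\\\".join(...)
def make_path_work_alt (pathstr : String) : String :=
  String.ofList (PySem.Chars.join ['\\', '\\'] (PySem.Chars.splitOn pathstr.toList ['\\']))

-- ===== PRECONDITION & SPEC =====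
def Spec_make_path_work (pathstr : String) (out : String) : Prop := out = make_path_work_alt pathstr
instance (pathstr : String) (out : String) : Decidable (Spec_make_path_work pathstr out) := by unfold Spec_make_path_work; infer_instance

-- ===== CLAIM (what is proved, stated in full; the proofs are below) =====
def Claim_equal_make_path_work : Prop := ∀ (pathstr : String), Dom_make_path_work pathstr → Spec_make_path_work pathstr (make_path_work pathstr)

-- ===== LEMMAS AND PROOFS =====

-- the character-wise escape map
def pvEsc (c : Char) : List Char := if c == '\\' then ['\\', '\\'] else [c]

-- prepend a run onto the first piece of a non-empty piece list
def pvConsHead (p : List Char) : List (List Char) → List (List Char)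
  | [] => [p]
  | h :: t => (p ++ h) :: t

-- reference split on a single backslash
def pvSplit : List Char → List (List Char)
  | [] => [[]]
  | c :: rest => if c = '\\' then [] :: pvSplit rest else pvConsHead [c] (pvSplit rest)

theorem pvSplit_ne_nil (l : List Char) : pvSplit l ≠ [] := by
  cases l with
  | nil => simp [pvSplit]
  | cons c rest =>
    simp only [pvSplit]
    split_ifs
    · simp
    · cases h : pvSplit rest <;> simp [pvConsHead]

theorem pvConsHead_nil (ps : List (List Char)) (h : ps ≠ []) : pvConsHead [] ps = ps := by
  cases ps with
  | nil => exact absurd rfl h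
  | cons a t => simp [pvConsHead]

theorem pvConsHead_consHead (a : List Char) (c : Char) (ps : List (List Char)) :
    pvConsHead a (pvConsHead [c] ps) = pvConsHead (a ++ [c]) ps := by
  cases ps <;> simp [pvConsHead]

theorem pvIntercalate_cc (sep a b : List Char) (t : List (List Char)) :
    sep.intercalate (a :: b :: t) = a ++ sep ++ sep.intercalate (b :: t) := by
  simp [List.intercalate]

theorem splitOn_go_single (l : List Char) : ∀ (fuel : Nat) (cur : List Char)
    (acc : List (List Char)), l.length < fuel →
    PySem.Chars.splitOn.go ['\\'] fuel l cur acc =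
      acc.reverse ++ pvConsHead cur.reverse (pvSplit l) := by
  induction l with
  | nil =>
    intro fuel cur acc h
    cases fuel with
    | zero => omega
    | succ f => simp [PySem.Chars.splitOn.go, pvSplit, pvConsHead]
  | cons c rest ih =>
    intro fuel cur acc h
    cases fuel with
    | zero => omega
    | succ f =>
      by_cases hc : c = '\\'
      · subst hc
        have hpre : List.isPrefixOf ['\\'] ('\\' :: rest) = true := by
          simp [List.isPrefixOf]
        rw [PySem.Chars.splitOn.go]
        simp only [hpre, if_true]
        have : List.drop (List.length ['\\']) ('\\' :: rest) = rest := by simp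
        rw [this, ih f [] (cur.reverse :: acc) (by simpa using Nat.lt_of_succ_lt_succ h)]
        simp [pvSplit, pvConsHead_nil _ (pvSplit_ne_nil rest), pvConsHead]
        cases hh : pvSplit rest with
        | nil => exact absurd hh (pvSplit_ne_nil rest)
        | cons a b => rfl
      · have hpre : List.isPrefixOf ['\\'] (c :: rest) = false := by
          simp [List.isPrefixOf]; exact fun hh => (hc hh.symm).elim
        rw [PySem.Chars.splitOn.go]
        simp only [hpre, if_false]
        rw [ih f (c :: cur) acc (by simpa using Nat.lt_of_succ_lt_succ h)]
        simp [pvSplit, hc, pvConsHead_consHead]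

theorem splitOn_single (l : List Char) :
    PySem.Chars.splitOn l ['\\'] = pvSplit l := by
  rw [PySem.Chars.splitOn, splitOn_go_single l (l.length + 1) [] [] (by omega)]
  simp [pvConsHead_nil _ (pvSplit_ne_nil l)]

theorem join_pvSplit (l : List Char) :
    PySem.Chars.join ['\\', '\\'] (pvSplit l) = l.flatMap pvEsc := by
  induction l with
  | nil => simp [pvSplit, PySem.Chars.join, List.intercalate]
  | cons c rest ih =>
    by_cases hc : c = '\\'
    · subst hc
      simp only [pvSplit, if_true]
      obtain ⟨h, t, hht⟩ : ∃ h t, pvSplit rest = h :: t := by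
        cases hh : pvSplit rest with
        | nil => exact absurd hh (pvSplit_ne_nil rest)
        | cons a b => exact ⟨a, b, rfl⟩
      rw [hht] at ih ⊢
      simp only [PySem.Chars.join] at ih ⊢
      rw [pvIntercalate_cc, ih]
      simp [pvEsc]
    · simp only [pvSplit, if_neg hc]
      obtain ⟨h, t, hht⟩ : ∃ h t, pvSplit rest = h :: t := by
        cases hh : pvSplit rest with
        | nil => exact absurd hh (pvSplit_ne_nil rest)
        | cons a b => exact ⟨a, b, rfl⟩
      rw [hht] at ih ⊢
      cases t with
      | nil =>
        simp only [PySem.Chars.join, List.intercalate, pvConsHead] at ih ⊢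
        simp [← ih, pvEsc, hc]
      | cons t0 ts =>
        simp only [PySem.Chars.join, pvConsHead] at ih ⊢
        rw [pvIntercalate_cc] at ih ⊢
        simp [← ih, pvEsc, hc]

-- ===== VERDICT (by name: the statement is the Claim_ definition above) =====
theorem make_path_work_spec : Claim_equal_make_path_work := by
  intro pathstr _
  unfold Spec_make_path_work make_path_work make_path_work_alt
  rw [splitOn_single, join_pvSplit,
    PySem.List.foldl_append_eq_flatMap (fun c => if c == '\\' then ['\\', '\\'] else [c])]
  rfl
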